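-- pv_equiv track=rewrite | github.com/nicoCT04/Proyecto-Automatas | shunting_yard.py | procesar_escapes
-- ===== SOURCE A (Python) =====
-- def procesar_escapes(expresion):
--     """
--     Procesa secuencias de escape y clases de caracteres en la expresión regular
--     Convierte \\. en ● (punto literal usando símbolo especial)
--     Convierte [ae03] en (a|e|0|3)
--     """
--     resultado = []
--     i = 0
--     while i < len(expresion):
--         if i < len(expresion) - 1 and expresion[i] == '\\':
--             # Carácter escapado
--             if expresion[i + 1] == '.':
--                 resultado.append('●')  # Punto literal usando símbolo especial
--                 i += 2
--             elif expresion[i + 1] == '?':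
--                 resultado.append('◆')  # Signo de interrogación literal usando símbolo especial
--                 i += 2
--             elif expresion[i + 1] == '(':
--                 resultado.append('◎')  # Paréntesis izquierdo literal
--                 i += 2
--             elif expresion[i + 1] == ')':
--                 resultado.append('◉')  # Paréntesis derecho literal
--                 i += 2
--             elif expresion[i + 1] == '\\':
--                 resultado.append('◈')  # Barra invertida literal
--                 i += 2
--             elif expresion[i + 1] == '{':
--                 resultado.append('◊')  # Llave izquierda literal
--                 i += 2
--             elif expresion[i + 1] == '}':
--                 resultado.append('◘')  # Llave derecha literal
--                 i += 2
--             else: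
--                 # Otros escapes - convertir a literal quitando la barra
--                 resultado.append(expresion[i + 1])
--                 i += 2
--         elif expresion[i] == '[':
--             # Clase de caracteres - encontrar el final
--             j = i + 1
--             while j < len(expresion) and expresion[j] != ']':
--                 j += 1
--             if j < len(expresion):
--                 # Extraer caracteres dentro de la clase
--                 caracteres_clase = expresion[i+1:j]
--                 # Convertir a unión: [ae03] -> (a|e|0|3)
--                 if len(caracteres_clase) > 1:
--                     union = '(' + '|'.join(caracteres_clase) + ')'
--                 else:
--                     union = caracteres_clase  # Solo un carácter
--                 resultado.append(union)
--                 i = j + 1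
--             else:
--                 # [ sin cierre - tratarlo como símbolo literal
--                 resultado.append(expresion[i])
--                 i += 1
--         else:
--             resultado.append(expresion[i])
--             i += 1
--     return ''.join(resultado)
-- ===== SOURCE B (Python) =====
-- _ESC = {'.': '●', '?': '◆', '(': '◎', ')': '◉', '\\': '◈', '{': '◊', '}': '◘'}
--
-- def procesar_escapes(expresion):
--     out = []
--     rest = expresion
--     while rest:
--         c = rest[0]
--         if c == '\\' and len(rest) > 1:
--             out.append(_ESC.get(rest[1], rest[1]))
--             rest = rest[2:]
--         elif c == '[':
--             inner, sep, after = rest[1:].partition(']')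
--             if sep:
--                 out.append('(' + '|'.join(inner) + ')' if len(inner) > 1 else inner)
--                 rest = after
--             else:
--                 out.append(c)
--                 rest = rest[1:]
--         else:
--             out.append(c)
--             rest = rest[1:]
--     return ''.join(out)
-- ===== Notes on version B (the rewrite author's own statement) =====
-- stated objective: simpler
-- what changed: Replaced the index-based while loop with its nine-branch elif chain and hand-written inner ']'-scanning loop by a suffix-consuming loop that uses a dict table for escapes and str.partition for character classes, removing the inner scan and all index arithmetic.
import Mathlib
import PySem

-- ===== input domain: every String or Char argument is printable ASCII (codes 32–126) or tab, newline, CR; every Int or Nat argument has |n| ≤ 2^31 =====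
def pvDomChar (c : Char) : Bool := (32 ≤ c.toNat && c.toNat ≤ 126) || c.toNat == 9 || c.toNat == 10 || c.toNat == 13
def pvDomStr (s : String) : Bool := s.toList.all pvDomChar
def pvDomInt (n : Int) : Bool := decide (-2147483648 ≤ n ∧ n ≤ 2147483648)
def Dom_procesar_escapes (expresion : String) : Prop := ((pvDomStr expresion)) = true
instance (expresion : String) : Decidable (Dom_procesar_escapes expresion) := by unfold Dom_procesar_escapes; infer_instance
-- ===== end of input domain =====

-- B replaces A's index-based loop with its nine-branch elif chain and hand-written inner ']'-scan by a
-- suffix-consuming loop using a dict table and str.partition (simpler; not measured faster).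
-- Both Pythons build a list of string chunks and ''.join it; both ports accumulate the chunk characters directly (exact).
-- Loops are ported as structural recursion on a fuel counter, a totality guard only: the fuel supplied always exceeds
-- the number of iterations the Python loop performs.

-- ===== PORT A =====
-- the union string '(' + '|'.join(cc) + ')' (if len > 1); '|'.join over a string of chars is intersperse (exact);
-- shared by both ports because both Pythons compute the union with this same expression
def pvUnion (inner : List Char) : List Char :=
  if inner.length > 1 then '(' :: (List.intersperse '|' inner) ++ [')'] else inner

-- the inner `while j < len(expresion) and expresion[j] != ']': j += 1` scan of A
def pvFindClose (xs : List Char) : Nat → Nat → Nat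
  | 0, j => j
  | fuel + 1, j =>
    if j < xs.length then
      (if xs.getD j ' ' = ']' then j else pvFindClose xs fuel (j + 1))
    else j

-- A's elif chain choosing the substitute for an escaped character
def pvEscA (c : Char) : Char :=
  if c = '.' then '●'
  else if c = '?' then '◆'
  else if c = '(' then '◎'
  else if c = ')' then '◉'
  else if c = '\\' then '◈'
  else if c = '{' then '◊'
  else if c = '}' then '◘'
  else c

-- A's main `while i < len(expresion)` loop; expresion[i+1:j] = (drop (i+1)).take (j-(i+1)) (exact: i+1 ≤ j ≤ len)
def pvLoopA (xs : List Char) : Nat → Nat → List Char → List Char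
  | 0, _, res => res
  | fuel + 1, i, res =>
    if i < xs.length then
      if i < xs.length - 1 ∧ xs.getD i ' ' = '\\' then
        pvLoopA xs fuel (i + 2) (res ++ [pvEscA (xs.getD (i + 1) ' ')])
      else if xs.getD i ' ' = '[' then
        let j := pvFindClose xs xs.length (i + 1)
        if j < xs.length then
          pvLoopA xs fuel (j + 1) (res ++ pvUnion ((xs.drop (i + 1)).take (j - (i + 1))))
        else
          pvLoopA xs fuel (i + 1) (res ++ [xs.getD i ' '])
      else
        pvLoopA xs fuel (i + 1) (res ++ [xs.getD i ' '])
    else res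

def procesar_escapes (expresion : String) : String :=
  String.mk (pvLoopA expresion.toList expresion.toList.length 0 [])

-- ===== PORT B =====
-- B's _ESC.get(c, c) dict lookup
def pvEsc (c : Char) : Char :=
  match c with
  | '.' => '●' | '?' => '◆' | '(' => '◎' | ')' => '◉' | '\\' => '◈' | '{' => '◊' | '}' => '◘'
  | _ => c

-- s.partition(']') for the one-char separator: (before, found?, after) (exact)
def pvPartition : List Char → List Char × Bool × List Char
  | [] => ([], false, [])
  | c :: cs =>
    if c = ']' then ([], true, cs)
    else
      let (a, f, b) := pvPartition cs
      (c :: a, f, b)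

-- B's `while rest:` loop, consuming the suffix `rest`
def pvLoopB : Nat → List Char → List Char → List Char
  | 0, _, out => out
  | _ + 1, [], out => out
  | fuel + 1, c :: tl, out =>
    if c = '\\' ∧ tl ≠ [] then
      pvLoopB fuel tl.tail (out ++ [pvEsc (tl.headD ' ')])
    else if c = '[' then
      let p := pvPartition tl
      if p.2.1 then pvLoopB fuel p.2.2 (out ++ pvUnion p.1)
      else pvLoopB fuel tl (out ++ [c])
    else pvLoopB fuel tl (out ++ [c])

def procesar_escapes_alt (expresion : String) : String :=
  String.mk (pvLoopB expresion.toList.length expresion.toList [])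

-- ===== PRECONDITION & SPEC =====
def Spec_procesar_escapes (expresion : String) (out : String) : Prop := out = procesar_escapes_alt expresion
instance (expresion : String) (out : String) : Decidable (Spec_procesar_escapes expresion out) := by unfold Spec_procesar_escapes; infer_instance

-- ===== CLAIM (what is proved, stated in full; the proofs are below) =====
def Claim_equal_procesar_escapes : Prop := ∀ (expresion : String), Dom_procesar_escapes expresion → Spec_procesar_escapes expresion (procesar_escapes expresion)

-- ===== LEMMAS AND PROOFS =====

lemma pvEscA_eq_pvEsc (c : Char) : pvEscA c = pvEsc c := by
  unfold pvEscA pvEsc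
  split_ifs with h1 h2 h3 h4 h5 h6 h7 <;> first | (subst_vars; rfl) | (split <;> simp_all)

lemma pvPartition_eq (l : List Char) :
    pvPartition l = (l.takeWhile (· ≠ ']'), decide (']' ∈ l), (l.dropWhile (· ≠ ']')).tail) := by
  induction l with
  | nil => simp [pvPartition]
  | cons c cs ih =>
    by_cases hc : c = ']'
    · subst hc; simp [pvPartition, List.takeWhile, List.dropWhile]
    · simp [pvPartition, hc, ih, List.takeWhile, List.dropWhile, Ne.symm hc]

lemma pvFindClose_eq (xs : List Char) :
    ∀ n j, xs.length ≤ j + n →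
      pvFindClose xs n j = j + ((xs.drop j).takeWhile (· ≠ ']')).length := by
  intro n
  induction n with
  | zero =>
    intro j h
    rw [pvFindClose]
    simp [List.drop_eq_nil_of_le (by omega : xs.length ≤ j)]
  | succ n ih =>
    intro j h
    rw [pvFindClose]
    by_cases hj : j < xs.length
    · have hdrop : xs.drop j = xs[j] :: xs.drop (j + 1) := (List.getElem_cons_drop hj).symm
      rw [hdrop]
      by_cases he : xs[j] = ']'
      · simp [hj, List.getD_eq_getElem _ _ hj, he, List.takeWhile]
      · simp only [hj, if_true, List.getD_eq_getElem _ _ hj, he, if_false, List.takeWhile]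
        rw [ih (j + 1) (by omega)]
        simp [he]
        omega
    · simp [hj, List.drop_eq_nil_of_le (by omega : xs.length ≤ j)]

lemma takeWhile_lt_of_mem {l : List Char} (h : ']' ∈ l) :
    (l.takeWhile (· ≠ ']')).length < l.length := by
  induction l with
  | nil => simp at h
  | cons c cs ih =>
    by_cases hc : c = ']'
    · subst hc; simp [List.takeWhile]
    · have hm : ']' ∈ cs := by simpa [Ne.symm hc] using h
      have := ih hm
      simp [List.takeWhile_cons, hc] at this ⊢
      omega

lemma takeWhile_len_of_not_mem {l : List Char} (h : ']' ∉ l) :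
    (l.takeWhile (· ≠ ']')).length = l.length := by
  have : l.takeWhile (· ≠ ']') = l := by
    apply List.takeWhile_eq_self_iff.mpr
    intro x hx
    simp
    intro hx'
    exact h (hx' ▸ hx)
  rw [this]

lemma take_takeWhile (l : List Char) :
    l.take ((l.takeWhile (· ≠ ']')).length) = l.takeWhile (· ≠ ']') :=
  (List.prefix_iff_eq_take.mp (List.takeWhile_prefix _)).symm

lemma drop_takeWhile_len (l : List Char) :
    l.drop ((l.takeWhile (· ≠ ']')).length) = l.dropWhile (· ≠ ']') := by
  induction l with
  | nil => rfl
  | cons c cs ih =>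
    by_cases hc : c = ']' <;> simp [hc] <;> simpa using ih

lemma drop_succ_tail {α : Type} (l : List α) (n : Nat) : l.drop (n + 1) = (l.drop n).tail := by
  rw [← List.drop_one (l := l.drop n), List.drop_drop]

lemma loopAB (xs : List Char) :
    ∀ n i res, xs.length ≤ i + n → pvLoopA xs n i res = pvLoopB n (xs.drop i) res := by
  intro n
  induction n with
  | zero =>
    intro i res _
    rw [pvLoopA, pvLoopB]
  | succ n ih =>
    intro i res h
    by_cases hi : i < xs.length
    · have hdrop : xs.drop i = xs[i] :: xs.drop (i + 1) := (List.getElem_cons_drop hi).symm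
      have hgd : xs.getD i ' ' = xs[i] := List.getD_eq_getElem _ _ hi
      rw [pvLoopA, if_pos hi, hdrop, pvLoopB]
      simp only [hgd]
      by_cases hesc : i < xs.length - 1 ∧ xs[i] = '\\'
      · obtain ⟨h1, hbs⟩ := hesc
        have h1' : i + 1 < xs.length := by omega
        have hdrop1 : xs.drop (i + 1) = xs[i + 1] :: xs.drop (i + 2) := (List.getElem_cons_drop h1').symm
        rw [if_pos ⟨h1, hbs⟩, if_pos ⟨hbs, by rw [hdrop1]; exact List.cons_ne_nil _ _⟩, hdrop1]
        simp only [List.tail_cons, List.headD_cons]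
        rw [List.getD_eq_getElem _ _ h1', pvEscA_eq_pvEsc]
        exact ih (i + 2) _ (by omega)
      · rw [if_neg hesc]
        have hBesc : ¬ (xs[i] = '\\' ∧ xs.drop (i + 1) ≠ []) := by
          rintro ⟨hbs, hne⟩
          apply hesc
          refine ⟨?_, hbs⟩
          by_contra hle
          exact hne (List.drop_eq_nil_of_le (by omega))
        rw [if_neg hBesc]
        by_cases hbr : xs[i] = '['
        · rw [if_pos hbr, if_pos hbr]
          set tl := xs.drop (i + 1) with htl
          set t := (tl.takeWhile (· ≠ ']')).length with ht
          have htllen : tl.length = xs.length - (i + 1) := by rw [htl]; simp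
          have hfind : pvFindClose xs xs.length (i + 1) = i + 1 + t := by
            rw [pvFindClose_eq xs (xs.length) (i + 1) (by omega), ← htl, ← ht]
          have hpart := pvPartition_eq tl
          by_cases hm : ']' ∈ tl
          · have htlt : t < tl.length := by rw [ht]; exact takeWhile_lt_of_mem hm
            have hjlt : i + 1 + t < xs.length := by omega
            simp only [hfind, if_pos hjlt, hpart, hm, decide_true, if_true]
            have htake : tl.take (i + 1 + t - (i + 1)) = tl.takeWhile (· ≠ ']') := by
              rw [show i + 1 + t - (i + 1) = t by omega, ht, take_takeWhile]
            have e1 : xs.drop (i + 1 + t + 1) = tl.drop (t + 1) := by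
              rw [htl, List.drop_drop]
              try congr 1
              all_goals omega
            have e2 : xs.drop (i + 1 + t + 1) = (tl.dropWhile (· ≠ ']')).tail := by
              rw [e1, drop_succ_tail, ht, drop_takeWhile_len]
            rw [htake, ih (i + 1 + t + 1) _ (by omega), e2]
          · have ht' : t = tl.length := by rw [ht]; exact takeWhile_len_of_not_mem hm
            have hjge : ¬ i + 1 + t < xs.length := by omega
            simp only [hfind, if_neg hjge, hpart, hm, decide_false]
            rw [if_neg (by simp), hbr]
            exact ih (i + 1) _ (by omega)
        · rw [if_neg hbr, if_neg hbr]
          exact ih (i + 1) _ (by omega)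
    · rw [pvLoopA, if_neg hi, List.drop_eq_nil_of_le (by omega : xs.length ≤ i)]
      cases n <;> rw [pvLoopB]

-- ===== VERDICT (by name: the statement is the Claim_ definition above) =====
theorem procesar_escapes_spec : Claim_equal_procesar_escapes := by
  intro e _
  unfold Spec_procesar_escapes procesar_escapes procesar_escapes_alt
  rw [loopAB e.toList e.toList.length 0 [] (by omega), List.drop_zero]
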